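-- pv_equiv track=rewrite | github.com/papersrepo2025/Path2Spec | Path_level_merge.py | _offset_to_line_idx
-- ===== SOURCE A (Python) =====
-- def _offset_to_line_idx(starts, pos: int) -> int:
--     """Binary search to map character offset to line number"""
--     lo, hi = 0, len(starts)
--     while lo + 1 < hi:
--         mid = (lo + hi) // 2
--         if starts[mid] <= pos:
--             lo = mid
--         else:
--             hi = mid
--     return lo
-- ===== SOURCE B (Python) =====
-- def _offset_to_line_idx(starts, pos: int) -> int:
--     """Forward linear scan: last index whose start offset does not exceed pos,
--     clamped to 0 for empty input or when pos precedes the first start."""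
--     idx = 0
--     for i, s in enumerate(starts):
--         if s <= pos:
--             idx = i
--         else:
--             break
--     return idx
-- ===== Notes on version B (the rewrite author's own statement) =====
-- stated objective: simpler
-- what changed: Replaces the iterative lo/hi binary search with a single forward scan that tracks the last index whose start offset does not exceed pos and breaks at the first larger one; Pre_ excludes inputs where the predicate starts[i] <= pos is not true-on-a-prefix (i.e. starts not sorted around pos), on which A's binary-search answer is an accident of which midpoints it probes.
-- outside the precondition, e.g. on _offset_to_line_idx([5, 0, 9], 3): A returns 1, B returns 0
import Mathlib
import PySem

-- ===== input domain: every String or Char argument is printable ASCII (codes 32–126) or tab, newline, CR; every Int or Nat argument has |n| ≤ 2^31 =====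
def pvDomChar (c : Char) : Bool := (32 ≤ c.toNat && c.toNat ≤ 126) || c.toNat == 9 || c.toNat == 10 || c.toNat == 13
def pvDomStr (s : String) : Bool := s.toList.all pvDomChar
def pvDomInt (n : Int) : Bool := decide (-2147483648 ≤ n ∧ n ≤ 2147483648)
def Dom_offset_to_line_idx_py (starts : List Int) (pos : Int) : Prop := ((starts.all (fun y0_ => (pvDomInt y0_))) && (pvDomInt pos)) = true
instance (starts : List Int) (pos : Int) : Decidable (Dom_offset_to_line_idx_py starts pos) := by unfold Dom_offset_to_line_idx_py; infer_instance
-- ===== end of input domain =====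

-- B replaces A's binary search by a single forward linear scan (simpler, not faster);
-- Pre_ keeps the inputs on which the probe predicate starts[i] <= pos is prefix-shaped,
-- the condition under which a binary search's answer is specified at all.


-- ===== PORT A =====
-- while lo + 1 < hi: mid = (lo+hi)//2; if starts[mid] <= pos: lo = mid else: hi = mid
-- (lo, hi are always in 0..len, so Nat indices are exact; starts[mid] via pyGet?, always in
-- range here; the fuel argument only makes the while loop total — hi - lo shrinks every
-- iteration, so fuel = len(starts) is never exhausted)
def offsetAGo (starts : List Int) (pos : Int) : Nat → Nat → Nat → Nat
  | 0, lo, _hi => lo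
  | fuel + 1, lo, hi =>
    if lo + 1 < hi then
      let mid := (lo + hi) / 2
      if (PySem.List.pyGet? starts (mid : Int)).getD 0 ≤ pos then
        offsetAGo starts pos fuel mid hi
      else
        offsetAGo starts pos fuel lo mid
    else lo

def offset_to_line_idx_py (starts : List Int) (pos : Int) : Int :=
  (offsetAGo starts pos starts.length 0 starts.length : Int)

-- ===== PORT B =====
-- idx = 0; for i, s in enumerate(starts): if s <= pos: idx = i else: break; return idx
def offsetBGo (pos : Int) (l : List Int) (i idx : Int) : Int :=
  match l with
  | [] => idx
  | s :: rest => if s ≤ pos then offsetBGo pos rest (i + 1) i else idx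

def offset_to_line_idx_py_alt (starts : List Int) (pos : Int) : Int :=
  offsetBGo pos starts 0 0

-- ===== PRECONDITION & SPEC =====
-- Pre_ excludes inputs on which the predicate starts[i] <= pos is not true-on-a-prefix
-- (starts unsorted around pos): there A still returns, but its value is an accident of
-- which midpoints the binary search happens to probe, and no value is the specified one.
def Pre_offset_to_line_idx_py (starts : List Int) (pos : Int) : Prop :=
  ∀ j, j < starts.length → ∀ i, i < j → starts.getD j 0 ≤ pos → starts.getD i 0 ≤ pos
instance (starts : List Int) (pos : Int) : Decidable (Pre_offset_to_line_idx_py starts pos) := by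
  unfold Pre_offset_to_line_idx_py; infer_instance

def pvWitness_offset_to_line_idx_py : List Int × Int := ([0, 5, 9], 6)

def Spec_offset_to_line_idx_py (starts : List Int) (pos : Int) (out : Int) : Prop := out = offset_to_line_idx_py_alt starts pos
instance (starts : List Int) (pos : Int) (out : Int) : Decidable (Spec_offset_to_line_idx_py starts pos out) := by unfold Spec_offset_to_line_idx_py; infer_instance

-- ===== CLAIM (what is proved, stated in full; the proofs are below) =====
def Claim_equal_offset_to_line_idx_py : Prop := ∀ (starts : List Int) (pos : Int), Dom_offset_to_line_idx_py starts pos → Pre_offset_to_line_idx_py starts pos → Spec_offset_to_line_idx_py starts pos (offset_to_line_idx_py starts pos)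

-- ===== LEMMAS AND PROOFS =====

theorem takeWhile_len_le (pos : Int) (l : List Int) :
    (l.takeWhile (fun s => decide (s ≤ pos))).length ≤ l.length := by
  induction l with
  | nil => simp
  | cons s rest ih =>
    rw [List.takeWhile_cons]
    split_ifs
    · simpa using ih
    · simp

-- B's scan returns idx when no leading element is ≤ pos, else i + (prefix length) - 1.
theorem offsetBGo_char (pos : Int) (l : List Int) (i idx : Int) :
    offsetBGo pos l i idx =
      if (l.takeWhile (fun s => decide (s ≤ pos))).length = 0 then idx
      else i + ((l.takeWhile (fun s => decide (s ≤ pos))).length : Int) - 1 := by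
  induction l generalizing i idx with
  | nil => simp [offsetBGo]
  | cons s rest ih =>
    by_cases h : s ≤ pos
    · have ht : List.takeWhile (fun s => decide (s ≤ pos)) (s :: rest)
          = s :: rest.takeWhile (fun s => decide (s ≤ pos)) := by
        rw [List.takeWhile_cons, if_pos (by simpa using h)]
      simp only [offsetBGo, if_pos h, ht, List.length_cons]
      rw [ih]
      split_ifs with h1 h2 h3
      · exact h2.elim
      · push_cast; omega
      · exact h3.elim
      · push_cast; omega
    · simp [offsetBGo, h]

theorem takeWhile_getD_le (pos : Int) (l : List Int) (m : Nat)
    (h : m < (l.takeWhile (fun s => decide (s ≤ pos))).length) :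
    l.getD m 0 ≤ pos := by
  induction l generalizing m with
  | nil => simp at h
  | cons s rest ih =>
    by_cases hs : s ≤ pos
    · rw [List.takeWhile_cons, if_pos (by simpa using hs), List.length_cons] at h
      cases m with
      | zero => simpa using hs
      | succ m => exact ih m (by omega)
    · rw [List.takeWhile_cons, if_neg (by simpa using hs)] at h
      simp at h

theorem takeWhile_getD_stop (pos : Int) (l : List Int)
    (h : (l.takeWhile (fun s => decide (s ≤ pos))).length < l.length) :
    ¬ (l.getD (l.takeWhile (fun s => decide (s ≤ pos))).length 0 ≤ pos) := by
  induction l with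
  | nil => simp at h
  | cons s rest ih =>
    by_cases hs : s ≤ pos
    · rw [List.takeWhile_cons, if_pos (by simpa using hs)] at h ⊢
      simp only [List.length_cons] at h ⊢
      simpa using ih (by omega)
    · rw [List.takeWhile_cons, if_neg (by simpa using hs)]
      simpa using hs

-- A's binary search, run on a prefix-shaped probe predicate (true exactly below k),
-- returns k - 1 (Nat subtraction: 0 when k = 0) from any bracketing interval.
theorem offsetAGo_char (starts : List Int) (pos : Int) (k : Nat)
    (hc : ∀ m, m < starts.length → (starts.getD m 0 ≤ pos ↔ m < k)) :
    ∀ d lo hi, hi - lo ≤ d → lo < hi → hi ≤ starts.length →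
      lo ≤ k - 1 → k - 1 < hi → offsetAGo starts pos d lo hi = k - 1 := by
  intro d
  induction d with
  | zero => intro lo hi hd hlt _ _ _; omega
  | succ d ih =>
    intro lo hi hd hlt hle hlo hhi
    rw [offsetAGo]
    by_cases hw : lo + 1 < hi
    · rw [if_pos hw]
      have hmid1 : lo < (lo + hi) / 2 := by omega
      have hmid2 : (lo + hi) / 2 < hi := by omega
      have hrange : (lo + hi) / 2 < starts.length := by omega
      have hget : (PySem.List.pyGet? starts (((lo + hi) / 2 : Nat) : Int)).getD 0
          = starts.getD ((lo + hi) / 2) 0 := by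
        simp only [PySem.List.pyGet?_natCast, List.getD_eq_getElem?_getD]
      by_cases hcm : starts.getD ((lo + hi) / 2) 0 ≤ pos
      · have hk : (lo + hi) / 2 < k := (hc _ hrange).mp hcm
        simp only [hget, if_pos hcm]
        exact ih _ _ (by omega) (by omega) hle (by omega) hhi
      · have hk : ¬ ((lo + hi) / 2 < k) := fun h => hcm ((hc _ hrange).mpr h)
        simp only [hget, if_neg hcm]
        exact ih _ _ (by omega) (by omega) (by omega) hlo (by omega)
    · rw [if_neg hw]
      omega

theorem offset_to_line_idx_py_spec : Claim_equal_offset_to_line_idx_py := by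
  intro starts pos _ hpre
  unfold Spec_offset_to_line_idx_py offset_to_line_idx_py offset_to_line_idx_py_alt
  set k := (starts.takeWhile (fun s => decide (s ≤ pos))).length with hk
  have hklen : k ≤ starts.length := takeWhile_len_le pos starts
  by_cases hlen : starts.length = 0
  · have : starts = [] := List.eq_nil_of_length_eq_zero hlen
    subst this
    simp [offsetAGo, offsetBGo]
  · -- characterize the probe predicate
    have hc : ∀ m, m < starts.length → (starts.getD m 0 ≤ pos ↔ m < k) := by
      intro m hm
      constructor
      · intro hle
        by_contra hge
        have hkm : k ≤ m := by omega
        have hklt : k < starts.length := by omega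
        have hnot := takeWhile_getD_stop pos starts (by omega)
        rw [← hk] at hnot
        rcases Nat.eq_or_lt_of_le hkm with heq | hlt
        · exact hnot (by rw [heq]; exact hle)
        · exact hnot (hpre m hm k hlt hle)
      · intro hmk
        exact takeWhile_getD_le pos starts m (by omega)
    have hA : offsetAGo starts pos starts.length 0 starts.length = k - 1 :=
      offsetAGo_char starts pos k hc starts.length 0 starts.length (by omega)
        (by omega) (le_refl _) (by omega) (by omega)
    rw [hA, offsetBGo_char]
    rw [← hk]
    split_ifs with h0 <;> omega
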